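-- pv_equiv track=rewrite | github.com/LoganFriedrich/MouseReach | src/mousereach/pipeline/triage.py | _group_contiguous_frames
-- ===== SOURCE A (Python) =====
-- from typing import Dict, List, Optional, Tuple
--
-- def _group_contiguous_frames(frames: List[int], gap: int = 10) -> List[List[int]]:
--     """Group frame numbers into contiguous events (within gap tolerance)."""
--     if not frames:
--         return []
--     groups = [[frames[0]]]
--     for f in frames[1:]:
--         if f - groups[-1][-1] <= gap:
--             groups[-1].append(f)
--         else:
--             groups.append([f])
--     return groups
-- ===== SOURCE B (Python) =====
-- def _group_contiguous_frames(frames, gap=10):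
--     """Group frame numbers into contiguous events (within gap tolerance)."""
--     if not frames:
--         return []
--     cuts = [0] \
--         + [i + 1 for i, (a, b) in enumerate(zip(frames, frames[1:])) if b - a > gap] \
--         + [len(frames)]
--     return [frames[a:b] for a, b in zip(cuts, cuts[1:])]
-- ===== Notes on version B (the rewrite author's own statement) =====
-- stated objective: alternative
-- what changed: B first computes the list of cut indices (one pass over adjacent pairs), then partitions the list by slicing between consecutive cuts, instead of A's single pass that appends each frame to the last group; both are linear.
import Mathlib
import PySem

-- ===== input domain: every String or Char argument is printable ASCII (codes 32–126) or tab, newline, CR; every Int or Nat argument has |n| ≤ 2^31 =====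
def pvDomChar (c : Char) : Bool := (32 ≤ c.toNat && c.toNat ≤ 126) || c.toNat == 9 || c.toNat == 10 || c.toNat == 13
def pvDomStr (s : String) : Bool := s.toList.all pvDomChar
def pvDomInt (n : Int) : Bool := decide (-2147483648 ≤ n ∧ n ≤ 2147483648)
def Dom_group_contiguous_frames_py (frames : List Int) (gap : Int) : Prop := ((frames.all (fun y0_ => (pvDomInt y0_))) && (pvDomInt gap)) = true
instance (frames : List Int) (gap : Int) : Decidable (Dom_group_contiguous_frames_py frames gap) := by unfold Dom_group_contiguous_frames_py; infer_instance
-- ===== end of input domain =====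

-- B computes the cut indices in one pass over adjacent pairs and then partitions the list by
-- slicing between consecutive cuts, instead of A's single pass appending to the last group;
-- objective: alternative (same linear cost, different decomposition).


-- ===== PORT A =====
-- One loop step of A: groups[-1][-1] is read (both lists are provably nonempty whenever the
-- step runs, so the `getD` defaults are never used), then the last group is extended or a new one opened.
def pvStepA (gap : Int) (groups : List (List Int)) (f : Int) : List (List Int) :=
  let lastg := groups.getLast?.getD []
  if f - lastg.getLast?.getD 0 ≤ gap then
    groups.dropLast ++ [lastg ++ [f]]      -- groups[-1].append(f)
  else
    groups ++ [[f]]                        -- groups.append([f])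

def group_contiguous_frames_py (frames : List Int) (gap : Int) : List (List Int) :=
  match frames with
  | [] => []                               -- if not frames: return []
  | x :: rest => rest.foldl (pvStepA gap) [[x]]   -- groups = [[frames[0]]]; for f in frames[1:] …

-- ===== PORT B =====
def group_contiguous_frames_py_alt (frames : List Int) (gap : Int) : List (List Int) :=
  if frames.isEmpty then []                -- if not frames: return []
  else
    -- cuts = [0] + [i + 1 for i, (a, b) in enumerate(zip(frames, frames[1:])) if b - a > gap] + [len(frames)]
    let cuts : List Int :=
      [(0 : Int)]
        ++ ((PySem.List.enumerate (frames.zip (PySem.List.slice frames (some 1) none)) 0).filter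
              (fun p => decide (p.2.2 - p.2.1 > gap))).map (fun p => p.1 + 1)
        ++ [(frames.length : Int)]
    -- return [frames[a:b] for a, b in zip(cuts, cuts[1:])]
    (cuts.zip (PySem.List.slice cuts (some 1) none)).map
      (fun ab => PySem.List.slice frames (some ab.1) (some ab.2))

-- ===== PRECONDITION & SPEC =====
def Spec_group_contiguous_frames_py (frames : List Int) (gap : Int) (out : List (List Int)) : Prop := out = group_contiguous_frames_py_alt frames gap
instance (frames : List Int) (gap : Int) (out : List (List Int)) : Decidable (Spec_group_contiguous_frames_py frames gap out) := by unfold Spec_group_contiguous_frames_py; infer_instance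

-- ===== CLAIM (what is proved, stated in full; the proofs are below) =====
def Claim_equal_group_contiguous_frames_py : Prop := ∀ (frames : List Int) (gap : Int), Dom_group_contiguous_frames_py frames gap → Spec_group_contiguous_frames_py frames gap (group_contiguous_frames_py frames gap)

-- ===== LEMMAS AND PROOFS =====

-- Canonical grouping both ports are reduced to: fold from the right, prepending to the first group.
def pvStepB (gap : Int) (f : Int) (groups : List (List Int)) : List (List Int) :=
  match groups with
  | [] => [[f]]
  | g :: gs => if g.headD 0 - f ≤ gap then (f :: g) :: gs else [f] :: g :: gs

def pvChop (gap : Int) (frames : List Int) : List (List Int) :=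
  frames.foldr (pvStepB gap) []

-- ---------- A-side: A equals pvChop ----------

-- Abstract form of A's loop: the running group `cur` (ending in `p`) plus the frames still to scan.
def pvRunA (gap : Int) (p : Int) (cur : List Int) : List Int → List (List Int)
  | [] => [cur]
  | f :: fs => if f - p ≤ gap then pvRunA gap f (cur ++ [f]) fs else cur :: pvRunA gap f [f] fs

-- A's foldl, started on any state whose last group `cur` ends in `p`, equals the finished
-- prefix `pre` followed by `pvRunA` on the remaining frames.
theorem pvFoldl_eq_runA (gap : Int) :
    ∀ (fs : List Int) (pre : List (List Int)) (cur : List Int) (p : Int),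
      cur.getLast? = some p →
      List.foldl (pvStepA gap) (pre ++ [cur]) fs = pre ++ pvRunA gap p cur fs := by
  intro fs
  induction fs with
  | nil => intro pre cur p _; simp [pvRunA]
  | cons f fs ih =>
    intro pre cur p hp
    have hstep : pvStepA gap (pre ++ [cur]) f =
        if f - p ≤ gap then pre ++ [cur ++ [f]] else (pre ++ [cur]) ++ [[f]] := by
      simp [pvStepA, hp]
    by_cases h : f - p ≤ gap
    · simp only [List.foldl_cons, hstep, if_pos h]
      rw [ih pre (cur ++ [f]) f (by simp)]
      simp [pvRunA, h]
    · simp only [List.foldl_cons, hstep, if_neg h]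
      rw [ih (pre ++ [cur]) [f] f (by simp)]
      simp [pvRunA, h]

-- pvRunA continued from previous frame `p` with running group `cur` is pvChop of the remaining
-- frames, with `cur` merged into (or placed before) its first group.
theorem pvRunA_eq_chop (gap : Int) :
    ∀ (fs : List Int) (p : Int) (cur : List Int),
      pvRunA gap p cur fs =
        match pvChop gap fs with
        | [] => [cur]
        | g :: gs => if g.headD 0 - p ≤ gap then (cur ++ g) :: gs else cur :: g :: gs := by
  intro fs
  induction fs with
  | nil => intro p cur; simp [pvRunA, pvChop]
  | cons f fs ih =>
    intro p cur
    have halt : pvChop gap (f :: fs) = pvStepB gap f (pvChop gap fs) := by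
      simp [pvChop]
    by_cases h : f - p ≤ gap
    · simp only [pvRunA, if_pos h, ih f (cur ++ [f]), halt]
      cases hfs : pvChop gap fs with
      | nil => simp [pvStepB, show f ≤ gap + p by omega]
      | cons g gs =>
        simp only [pvStepB]
        by_cases h2 : g.headD 0 - f ≤ gap
        · rw [if_pos h2, if_pos h2]; simp [show f ≤ gap + p by omega]
        · rw [if_neg h2, if_neg h2]; simp [show f ≤ gap + p by omega]
    · simp only [pvRunA, if_neg h, ih f [f], halt]
      cases hfs : pvChop gap fs with
      | nil => simp [pvStepB, show ¬ f ≤ gap + p by omega]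
      | cons g gs =>
        simp only [pvStepB]
        by_cases h2 : g.headD 0 - f ≤ gap
        · rw [if_pos h2, if_pos h2]; simp [show ¬ f ≤ gap + p by omega]
        · rw [if_neg h2, if_neg h2]; simp [show ¬ f ≤ gap + p by omega]

-- The first group produced by pvChop on a nonempty list starts with its first element.
theorem pvChop_head (gap z : Int) (rest : List Int) :
    ∃ t gs, pvChop gap (z :: rest) = (z :: t) :: gs := by
  have h : pvChop gap (z :: rest) = pvStepB gap z (pvChop gap rest) := by simp [pvChop]
  cases hc : pvChop gap rest with
  | nil => exact ⟨[], [], by simp [h, hc, pvStepB]⟩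
  | cons g gs =>
    by_cases h2 : g.headD 0 - z ≤ gap
    · exact ⟨g, gs, by rw [h, hc]; simp only [pvStepB]; rw [if_pos h2]⟩
    · exact ⟨[], g :: gs, by rw [h, hc]; simp only [pvStepB]; rw [if_neg h2]⟩

theorem pvA_eq_chop (frames : List Int) (gap : Int) :
    group_contiguous_frames_py frames gap = pvChop gap frames := by
  cases frames with
  | nil => simp [group_contiguous_frames_py, pvChop]
  | cons x rest =>
    have h1 : group_contiguous_frames_py (x :: rest) gap = pvRunA gap x [x] rest := by
      have := pvFoldl_eq_runA gap rest [] [x] x (by simp)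
      simpa [group_contiguous_frames_py] using this
    rw [h1, pvRunA_eq_chop gap rest x [x]]
    have halt : pvChop gap (x :: rest) = pvStepB gap x (pvChop gap rest) := by simp [pvChop]
    rw [halt]
    cases hfs : pvChop gap rest with
    | nil => simp [pvStepB]
    | cons g gs => simp [pvStepB]

-- ---------- B-side: B equals pvChop ----------

-- The interior cut indices B's comprehension computes (start of enumerate generalised to `s`).
def pvICuts (gap s : Int) (l : List (Int × Int)) : List Int :=
  ((PySem.List.enumerate l s).filter (fun p => decide (p.2.2 - p.2.1 > gap))).map (fun p => p.1 + 1)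

theorem pvICuts_cons (gap s x y : Int) (l : List (Int × Int)) :
    pvICuts gap s ((x, y) :: l) =
      (if y - x > gap then [s + 1] else []) ++ pvICuts gap (s + 1) l := by
  by_cases h : y - x > gap <;> simp [pvICuts, PySem.List.enumerate_cons, h]

theorem pvICuts_shift (gap : Int) :
    ∀ (l : List (Int × Int)) (s : Int), pvICuts gap (s + 1) l = (pvICuts gap s l).map (· + 1) := by
  intro l
  induction l with
  | nil => intro s; simp [pvICuts]
  | cons p l ih =>
    intro s
    obtain ⟨x, y⟩ := p
    rw [pvICuts_cons, pvICuts_cons, ih (s + 1), ih s]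
    by_cases h : y - x > gap <;> simp [h, List.map_map]
theorem pvICuts_nonneg (gap : Int) :
    ∀ (l : List (Int × Int)) (s : Int), 0 ≤ s → ∀ a ∈ pvICuts gap s l, 0 ≤ a := by
  intro l
  induction l with
  | nil => intro s _ a ha; simp [pvICuts] at ha
  | cons p l ih =>
    intro s hs a ha
    obtain ⟨x, y⟩ := p
    rw [pvICuts_cons] at ha
    rcases List.mem_append.mp ha with h1 | h2
    · by_cases h : y - x > gap <;> simp [h] at h1; omega
    · exact ih (s + 1) (by omega) a h2

-- Chain of slices between consecutive entries of a cut list.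
def pvChain (frames : List Int) : List Int → List (List Int)
  | a :: b :: t => PySem.List.slice frames (some a) (some b) :: pvChain frames (b :: t)
  | _ => []

theorem pvZip_tail_eq_chain (frames : List Int) :
    ∀ (l : List Int),
      (l.zip l.tail).map (fun ab => PySem.List.slice frames (some ab.1) (some ab.2)) =
        pvChain frames l := by
  intro l
  induction l with
  | nil => simp [pvChain]
  | cons a t ih =>
    cases t with
    | nil => simp [pvChain]
    | cons b t' => simpa [pvChain] using ih

-- Python slice arithmetic used to peel the head element off every slice.
theorem pvSlice_shift (y : Int) (ys : List Int) (a b : Int) (ha : 0 ≤ a) (hb : 0 ≤ b) :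
    PySem.List.slice (y :: ys) (some (a + 1)) (some (b + 1)) =
      PySem.List.slice ys (some a) (some b) := by
  rw [PySem.List.slice_toNat _ (by omega) (by omega), PySem.List.slice_toNat _ ha hb]
  have h1 : (a + 1).toNat = a.toNat + 1 := by omega
  have h2 : (b + 1).toNat = b.toNat + 1 := by omega
  rw [h1, h2]
  simp [Nat.succ_sub_succ]

theorem pvSlice_zero_succ (y : Int) (ys : List Int) (b : Int) (hb : 0 ≤ b) :
    PySem.List.slice (y :: ys) (some 0) (some (b + 1)) =
      y :: PySem.List.slice ys (some 0) (some b) := by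
  rw [PySem.List.slice_toNat _ (by omega) (by omega), PySem.List.slice_toNat _ le_rfl hb]
  have h2 : (b + 1).toNat = b.toNat + 1 := by omega
  simp [h2]

-- A chain whose cuts are all shifted by one over a list with one extra head element is the
-- chain of the original cuts over the tail.
theorem pvChain_shift (y : Int) (ys : List Int) :
    ∀ (l : List Int), (∀ x ∈ l, 0 ≤ x) →
      pvChain (y :: ys) (l.map (· + 1)) = pvChain ys l := by
  intro l
  induction l with
  | nil => intro _; simp [pvChain]
  | cons a t ih =>
    intro hpos
    cases t with
    | nil => simp [pvChain]
    | cons b t' =>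
      have ha : 0 ≤ a := hpos a (by simp)
      have hb : 0 ≤ b := hpos b (by simp)
      simp only [List.map_cons, pvChain]
      rw [pvSlice_shift y ys a b ha hb]
      have := ih (fun x hx => hpos x (List.mem_cons_of_mem _ hx))
      simpa [pvChain] using this

-- Main B-side induction: the chain of slices between the cuts equals pvChop.
theorem pvChain_cuts_eq_chop (gap : Int) :
    ∀ (rest : List Int) (y : Int),
      pvChain (y :: rest)
          ((0 : Int) :: (pvICuts gap 0 ((y :: rest).zip rest) ++ [((y :: rest).length : Int)])) =
        pvChop gap (y :: rest) := by
  intro rest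
  induction rest with
  | nil =>
    intro y
    simp [pvICuts, pvChain, pvChop, pvStepB, PySem.List.enumerate_nil,
          PySem.List.slice_toNat _ (le_refl (0 : Int)) (by norm_num : (0:Int) ≤ 1)]
  | cons z rest ih =>
    intro y
    have hzip : (y :: z :: rest).zip (z :: rest) = (y, z) :: ((z :: rest).zip rest) := by simp
    have hlen : ((y :: z :: rest).length : Int) = ((z :: rest).length : Int) + 1 := by
      push_cast [List.length_cons]; ring
    set c := pvICuts gap 0 ((z :: rest).zip rest) with hc
    have hcpos : ∀ x ∈ c ++ [((z :: rest).length : Int)], 0 ≤ x := by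
      intro x hx
      rcases List.mem_append.mp hx with h1 | h2
      · exact pvICuts_nonneg gap _ 0 le_rfl x h1
      · simp at h2; omega
    have hcuts : pvICuts gap 0 ((y :: z :: rest).zip (z :: rest)) =
        (if z - y > gap then [(1 : Int)] else []) ++ c.map (· + 1) := by
      rw [hzip, pvICuts_cons, pvICuts_shift]
      norm_num
      rw [← hc]
    have hfull : pvICuts gap 0 ((y :: z :: rest).zip (z :: rest)) ++ [((y :: z :: rest).length : Int)] =
        (if z - y > gap then [(1 : Int)] else []) ++ (c ++ [((z :: rest).length : Int)]).map (· + 1) := by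
      rw [hcuts, hlen]
      simp [List.append_assoc]
    obtain ⟨t, gs, hhead⟩ := pvChop_head gap z rest
    have hstep : pvChop gap (y :: z :: rest) = pvStepB gap y (pvChop gap (z :: rest)) := by
      simp [pvChop]
    by_cases h : z - y > gap
    · -- cut between y and z: first group is [y]
      rw [hfull]
      simp only [if_pos h, List.singleton_append]
      rw [show ((1:Int) :: (c ++ [((z :: rest).length : Int)]).map (· + 1)) =
            ((0 :: (c ++ [((z :: rest).length : Int)])).map (· + 1)) by simp]
      -- chain = slice[0:1] :: shifted chain
      have hchain : pvChain (y :: z :: rest)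
            ((0 : Int) :: ((0 :: (c ++ [((z :: rest).length : Int)])).map (· + 1))) =
          PySem.List.slice (y :: z :: rest) (some 0) (some 1) ::
            pvChain (y :: z :: rest) ((0 :: (c ++ [((z :: rest).length : Int)])).map (· + 1)) := by
        cases hl : (c ++ [((z :: rest).length : Int)]) with
        | nil => simp at hl
        | cons a t' => simp [pvChain]
      rw [hchain]
      have hslice01 : PySem.List.slice (y :: z :: rest) (some 0) (some 1) = [y] := by
        have := pvSlice_zero_succ y (z :: rest) 0 le_rfl
        simpa [PySem.List.slice_toNat _ (le_refl (0:Int)) (le_refl (0:Int))] using this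
      have hpos0 : ∀ x ∈ (0 : Int) :: (c ++ [((z :: rest).length : Int)]), 0 ≤ x := by
        intro x hx
        rcases List.mem_cons.mp hx with h1 | h2
        · omega
        · exact hcpos x h2
      rw [hslice01, pvChain_shift y (z :: rest) _ hpos0, ih z, hstep, hhead]
      simp [pvStepB, show ¬ (z - y ≤ gap) by omega]
    · -- no cut: y joins the first group
      rw [hfull]
      simp only [if_neg h, List.nil_append]
      cases hl : (c ++ [((z :: rest).length : Int)]) with
      | nil => simp at hl
      | cons a t' =>
        have hapos : 0 ≤ a := hcpos a (by rw [hl]; simp)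
        have htpos : ∀ x ∈ t', 0 ≤ x := fun x hx => hcpos x (by rw [hl]; simp [hx])
        -- both chains start with the slice up to the first cut
        have hLHS : pvChain (y :: z :: rest) ((0 : Int) :: (a :: t').map (· + 1)) =
            (y :: PySem.List.slice (z :: rest) (some 0) (some a)) ::
              pvChain (z :: rest) (a :: t') := by
          simp only [List.map_cons, pvChain]
          rw [pvSlice_zero_succ y (z :: rest) a hapos]
          congr 1
          have hpos1 : ∀ x ∈ a :: t', 0 ≤ x := by
            intro x hx
            rcases List.mem_cons.mp hx with h1 | h2
            · omega
            · exact htpos x h2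
          exact pvChain_shift y (z :: rest) (a :: t') hpos1
        have hRHS : pvChain (z :: rest) ((0 : Int) :: a :: t') =
            PySem.List.slice (z :: rest) (some 0) (some a) :: pvChain (z :: rest) (a :: t') := by
          simp [pvChain]
        have hih := ih z
        rw [hl] at hih
        rw [hRHS] at hih
        rw [hLHS, hstep, hhead]
        -- pvChop (z :: rest) = (z :: t) :: gs and its first group is the first slice
        rw [hhead] at hih
        have h1 : PySem.List.slice (z :: rest) (some 0) (some a) = z :: t :=
          (List.cons.injEq _ _ _ _).mp hih |>.1
        have h2 : pvChain (z :: rest) (a :: t') = gs :=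
          (List.cons.injEq _ _ _ _).mp hih |>.2
        rw [h1, h2]
        simp [pvStepB, show z - y ≤ gap by omega]

theorem pvB_eq_chop (frames : List Int) (gap : Int) :
    group_contiguous_frames_py_alt frames gap = pvChop gap frames := by
  cases frames with
  | nil => simp [group_contiguous_frames_py_alt, pvChop]
  | cons y rest =>
    simp only [group_contiguous_frames_py_alt, List.isEmpty_cons, Bool.false_eq_true,
               if_false, PySem.List.slice_from_one]
    rw [pvZip_tail_eq_chain]
    have hform : ([(0 : Int)]
        ++ ((PySem.List.enumerate ((y :: rest).zip (y :: rest).tail) 0).filter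
              (fun p => decide (p.2.2 - p.2.1 > gap))).map (fun p => p.1 + 1)
        ++ [((y :: rest).length : Int)]) =
        (0 : Int) :: (pvICuts gap 0 ((y :: rest).zip rest) ++ [((y :: rest).length : Int)]) := by
      simp [pvICuts]
    rw [hform, pvChain_cuts_eq_chop]

-- ===== VERDICT (by name: the statement is the Claim_ definition above) =====
theorem group_contiguous_frames_py_spec : Claim_equal_group_contiguous_frames_py := by
  intro frames gap _
  unfold Spec_group_contiguous_frames_py
  rw [pvA_eq_chop, pvB_eq_chop]
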